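-- pv_equiv track=rewrite | github.com/pypi-data/pypi-mirror-192 | packages/admcycles/admcycles-1.4.tar.gz/admcycles-1.4/admcycles/DR/relations.py | choose_orders
-- ===== SOURCE A (Python) =====
-- def choose_orders(L):
--     rows = len(L)
--     if rows == 0:
--         return [], []
--     cols = len(L[0])
--     row_nums = [0 for i in range(rows)]
--     col_nums = [0 for j in range(cols)]
--     for i in range(rows):
--         for j in range(cols):
--             if L[i][j] != 0:
--                 row_nums[i] += 1
--                 col_nums[j] += 1
--     row_order = list(range(rows))
--     col_order = list(range(cols))
--     row_order.sort(key=lambda x: row_nums[x])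
--     col_order.sort(key=lambda x: col_nums[x])
--     return row_order, col_order
-- ===== SOURCE B (Python) =====
-- def choose_orders(L):
--     if not L:
--         return [], []
--     rows, cols = len(L), len(L[0])
--     # Counting sort: distribute indices into buckets indexed by nonzero count,
--     # then concatenate buckets in increasing count order (stability for free).
--     row_buckets = [[] for _ in range(cols + 1)]
--     col_nums = [0] * cols
--     for i, row in enumerate(L):
--         row_buckets[cols - row[:cols].count(0)].append(i)
--         col_nums = [c + (v != 0) for c, v in zip(col_nums, row)]
--     col_buckets = [[] for _ in range(rows + 1)]
--     for j, c in enumerate(col_nums):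
--         col_buckets[c].append(j)
--     row_order = [i for bucket in row_buckets for i in bucket]
--     col_order = [j for bucket in col_buckets for j in bucket]
--     return row_order, col_order
-- ===== Notes on version B (the rewrite author's own statement) =====
-- stated objective: alternative
-- what changed: Replaces the count-then-comparison-sort strategy (two counter arrays filled by a fused nested loop, then two stable key sorts of index ranges) with a counting/bucket sort: row indices are distributed directly into buckets indexed by their nonzero count in one pass over the rows (column counts accumulated as a zipped vector in the same pass), column indices likewise, and each order is the concatenation of its buckets in increasing count order.
import Mathlib
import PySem

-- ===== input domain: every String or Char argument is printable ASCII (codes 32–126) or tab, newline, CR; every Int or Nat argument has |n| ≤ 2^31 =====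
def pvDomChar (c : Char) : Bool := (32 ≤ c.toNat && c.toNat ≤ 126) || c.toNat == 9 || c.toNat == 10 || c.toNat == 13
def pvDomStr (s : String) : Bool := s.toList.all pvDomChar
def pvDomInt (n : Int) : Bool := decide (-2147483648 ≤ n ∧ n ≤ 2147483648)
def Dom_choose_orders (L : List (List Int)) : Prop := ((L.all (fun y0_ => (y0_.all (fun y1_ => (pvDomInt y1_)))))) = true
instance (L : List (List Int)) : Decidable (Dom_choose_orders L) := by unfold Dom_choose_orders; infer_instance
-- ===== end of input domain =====

-- B replaces A's count-then-stable-sort strategy with a counting/bucket sort: indices are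
-- distributed into buckets by nonzero count and the buckets concatenated in count order;
-- objective: alternative. Equal return values wherever A does not raise (Pre_).

-- ===== PORT A =====
def choose_orders (L : List (List Int)) : List Int × List Int :=
  let rows : Int := L.length
  if rows = 0 then ([], []) else
  let cols : Int := (PySem.List.pyGetD L 0 []).length
  let row_nums : List Int := (PySem.List.pyRange 0 rows 1).map (fun _ => (0 : Int))
  let col_nums : List Int := (PySem.List.pyRange 0 cols 1).map (fun _ => (0 : Int))
  let rc : List Int × List Int :=
    (PySem.List.pyRange 0 rows 1).foldl (fun rc i =>
      (PySem.List.pyRange 0 cols 1).foldl (fun rc j =>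
        if PySem.List.pyGetD (PySem.List.pyGetD L i []) j 0 ≠ 0 then
          (PySem.List.pySetD rc.1 i (PySem.List.pyGetD rc.1 i 0 + 1),
           PySem.List.pySetD rc.2 j (PySem.List.pyGetD rc.2 j 0 + 1))
        else rc) rc) (row_nums, col_nums)
  let row_order := PySem.List.sorted (PySem.List.pyRange 0 rows 1) (fun x => PySem.List.pyGetD rc.1 x 0) false
  let col_order := PySem.List.sorted (PySem.List.pyRange 0 cols 1) (fun x => PySem.List.pyGetD rc.2 x 0) false
  (row_order, col_order)

-- ===== PORT B =====
def choose_orders_alt (L : List (List Int)) : List Int × List Int :=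
  match L with
  | [] => ([], [])
  | r0 :: _ =>
    let rows : Int := L.length
    let cols : Int := r0.length
    let st : List (List Int) × List Int :=
      (PySem.List.enumerate L 0).foldl (fun (st : List (List Int) × List Int) p =>
        let k : Int := cols - (PySem.List.count (PySem.List.slice p.2 none (some cols)) 0 : Nat)
        (PySem.List.pySetD st.1 k (PySem.List.pyGetD st.1 k [] ++ [p.1]),
         (st.2.zip p.2).map (fun cv => cv.1 + (if cv.2 ≠ 0 then (1 : Int) else 0))))
        ((PySem.List.pyRange 0 (cols + 1) 1).map (fun _ => ([] : List Int)),
         List.replicate r0.length (0 : Int))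
    let col_buckets : List (List Int) :=
      (PySem.List.enumerate st.2 0).foldl (fun cb p =>
        PySem.List.pySetD cb p.2 (PySem.List.pyGetD cb p.2 [] ++ [p.1]))
        ((PySem.List.pyRange 0 (rows + 1) 1).map (fun _ => ([] : List Int)))
    (st.1.flatten, col_buckets.flatten)

-- ===== PRECONDITION & SPEC =====
-- Pre_ excludes exactly the inputs where A raises IndexError: some row shorter than the first row
-- (A reads L[i][j] for every j < len(L[0])). On every other input A returns.
def Pre_choose_orders (L : List (List Int)) : Prop := ∀ r ∈ L, L.headI.length ≤ r.length
instance (L : List (List Int)) : Decidable (Pre_choose_orders L) := by unfold Pre_choose_orders; infer_instance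
def pvWitness_choose_orders : List (List Int) := [[1, 0], [0, 2], [3, 4, 5]]

def Spec_choose_orders (L : List (List Int)) (out : List Int × List Int) : Prop := out = choose_orders_alt L
instance (L : List (List Int)) (out : List Int × List Int) : Decidable (Spec_choose_orders L out) := by unfold Spec_choose_orders; infer_instance

-- ===== CLAIM (what is proved, stated in full; the proofs are below) =====
def Claim_equal_choose_orders : Prop := ∀ (L : List (List Int)), Dom_choose_orders L → Pre_choose_orders L → Spec_choose_orders L (choose_orders L)

-- ===== LEMMAS AND PROOFS =====

-- 1 if the j-th entry of a row is nonzero (missing entries read as 0)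
def pvInd (row : List Int) (j : Nat) : Int := if row.getD j 0 ≠ 0 then 1 else 0

-- column-count suffix sum: number of rows i ≥ t with L[i][j] ≠ 0
def pvColS (L : List (List Int)) (t : Nat) (j : Nat) : Int :=
  ((List.range' t (L.length - t)).map (fun i => pvInd (L.getD i []) j)).sum

-- count of nonzero entries of a list
def pvCnt (xs : List Int) : Int :=
  ((xs.filter (fun v => v ≠ 0)).map (fun _ => (1 : Int))).sum

lemma pv_set_map_range {β : Type} {n a : Nat} (v : β) (g : Nat → β) :
    ((List.range n).map g).set a v = (List.range n).map (fun j => if j = a then v else g j) := by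
  apply List.ext_getElem
  · simp
  · intro k h1 h2
    simp only [List.getElem_set, List.getElem_map, List.getElem_range]
    simp only [List.length_set, List.length_map, List.length_range] at h1
    rcases eq_or_ne k a with h | h
    · simp [h]
    · simp [h, Ne.symm h]

lemma pv_map_eq_map_range (xs : List (List Int)) (f : List Int → Int) :
    xs.map f = (List.range xs.length).map (fun i => f (xs.getD i [])) := by
  apply List.ext_getElem
  · simp
  · intro k h1 h2
    simp only [List.getElem_map, List.getElem_range]
    simp only [List.length_map] at h1
    rw [List.getD_eq_getElem _ _ h1]

lemma pv_take_eq_map_range (xs : List Int) (m : Nat) (hm : m ≤ xs.length) :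
    xs.take m = (List.range m).map (fun j => xs.getD j 0) := by
  apply List.ext_getElem
  · simp [hm]
  · intro k h1 h2
    simp only [List.getElem_take, List.getElem_map, List.getElem_range]
    rw [List.getD_eq_getElem _ _ (by simp at h1; omega)]

lemma pv_cnt_eq_countP (xs : List Int) :
    pvCnt xs = ((xs.countP (fun v => decide (v ≠ 0)) : Nat) : Int) := by
  simp [pvCnt, List.countP_eq_length_filter]

lemma pv_rfold (js : List Int) (P : Int → Prop) [DecidablePred P] (i : Nat) :
    ∀ r : List Int, i < r.length →
    js.foldl (fun r j => if P j then
        PySem.List.pySetD r (i : Int) (PySem.List.pyGetD r (i : Int) 0 + 1) else r) r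
      = r.set i (r.getD i 0 + ((js.countP (fun j => decide (P j)) : Nat) : Int)) := by
  induction js with
  | nil =>
    intro r hr
    simp only [List.foldl_nil, List.countP_nil, Nat.cast_zero, add_zero,
      List.getD_eq_getElem r 0 hr, List.set_getElem_self hr]
  | cons j js ih =>
    intro r hr
    simp only [List.foldl_cons, List.countP_cons]
    by_cases hP : P j
    · rw [if_pos hP]
      rw [ih _ (by simp [PySem.List.pySetD_natCast]; exact hr)]
      simp only [PySem.List.pySetD_natCast, PySem.List.pyGetD_natCast]
      rw [List.set_set]
      congr 1
      rw [List.getD_eq_getElem _ _ (by simpa using hr), List.getElem_set, if_pos rfl]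
      rw [List.getD_eq_getElem r 0 hr]
      simp [hP]
      ring
    · rw [if_neg hP, ih r hr]
      simp [hP]

lemma pv_cfold (P : Int → Prop) [DecidablePred P] (m : Nat) :
    ∀ (k a : Nat), a + k = m → ∀ g : Nat → Int,
    (PySem.List.pyRange (a : Int) (m : Int) 1).foldl
        (fun c j => if P j then
          PySem.List.pySetD c j (PySem.List.pyGetD c j 0 + 1) else c)
        ((List.range m).map g)
      = (List.range m).map (fun j => if a ≤ j ∧ P (j : Int) then g j + 1 else g j) := by
  intro k
  induction k with
  | zero =>
    intro a ha g
    rw [PySem.List.pyRange_one_eq_nil (by exact_mod_cast (by omega : m ≤ a))]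
    rw [List.foldl_nil]
    apply List.map_congr_left
    intro j hj
    rw [List.mem_range] at hj
    rw [if_neg (by intro hc; omega : ¬(a ≤ j ∧ P (j : Int)))]
  | succ k ih =>
    intro a ha g
    rw [PySem.List.pyRange_one_cons (by exact_mod_cast (by omega : a < m))]
    simp only [List.foldl_cons]
    by_cases hP : P (a : Int)
    · rw [if_pos hP]
      rw [PySem.List.pySetD_natCast, PySem.List.pyGetD_natCast,
        PySem.List.getD_map_range _ _ _ _ (by omega), pv_set_map_range]
      have : ((a : Int) + 1) = ((a + 1 : Nat) : Int) := by push_cast; ring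
      rw [this, ih (a + 1) (by omega)]
      apply List.map_congr_left
      intro j hj
      by_cases hja : j = a
      · subst hja
        simp [hP]
      · by_cases hPj : P (j : Int)
        · have h2 : (a + 1 ≤ j) ↔ (a ≤ j) := by omega
          simp [hPj, h2, hja]
        · simp [hPj, hja]
    · rw [if_neg hP]
      have : ((a : Int) + 1) = ((a + 1 : Nat) : Int) := by push_cast; ring
      rw [this, ih (a + 1) (by omega)]
      apply List.map_congr_left
      intro j hj
      by_cases hja : j = a
      · subst hja
        simp [hP]
      · by_cases hPj : P (j : Int)
        · have h2 : (a + 1 ≤ j) ↔ (a ≤ j) := by omega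
          simp [hPj, h2, hja]
        · simp [hPj, hja]

lemma pv_inner (row : List Int) (m : Nat) (hm : m ≤ row.length) (n : Nat) (i : Nat) (hi : i < n)
    (rg cg : Nat → Int) :
    (PySem.List.pyRange 0 (m : Int) 1).foldl
      (fun (rc : List Int × List Int) j => if PySem.List.pyGetD row j 0 ≠ 0 then
          (PySem.List.pySetD rc.1 (i : Int) (PySem.List.pyGetD rc.1 (i : Int) 0 + 1),
           PySem.List.pySetD rc.2 j (PySem.List.pyGetD rc.2 j 0 + 1)) else rc)
      ((List.range n).map rg, (List.range m).map cg)
    = ((List.range n).map (fun i' => if i' = i then rg i + pvCnt (row.take m) else rg i'),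
       (List.range m).map (fun j => cg j + pvInd row j)) := by
  have hbody : (fun (rc : List Int × List Int) (j : Int) => if PySem.List.pyGetD row j 0 ≠ 0 then
          (PySem.List.pySetD rc.1 (i : Int) (PySem.List.pyGetD rc.1 (i : Int) 0 + 1),
           PySem.List.pySetD rc.2 j (PySem.List.pyGetD rc.2 j 0 + 1)) else rc)
      = (fun (rc : List Int × List Int) (j : Int) =>
          ((if PySem.List.pyGetD row j 0 ≠ 0 then
              PySem.List.pySetD rc.1 (i : Int) (PySem.List.pyGetD rc.1 (i : Int) 0 + 1) else rc.1),
           (if PySem.List.pyGetD row j 0 ≠ 0 then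
              PySem.List.pySetD rc.2 j (PySem.List.pyGetD rc.2 j 0 + 1) else rc.2))) := by
    funext rc j
    by_cases h : PySem.List.pyGetD row j 0 ≠ 0 <;> simp [h]
  rw [hbody, PySem.List.foldl_prod_mk
    (fun r (j : Int) => if PySem.List.pyGetD row j 0 ≠ 0 then
        PySem.List.pySetD r (i : Int) (PySem.List.pyGetD r (i : Int) 0 + 1) else r)
    (fun c (j : Int) => if PySem.List.pyGetD row j 0 ≠ 0 then
        PySem.List.pySetD c j (PySem.List.pyGetD c j 0 + 1) else c)]
  rw [Prod.mk.injEq]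
  constructor
  · rw [pv_rfold _ (fun j => PySem.List.pyGetD row j 0 ≠ 0) i _ (by simpa using hi)]
    rw [List.getD_eq_getElem _ _ (by simpa using hi)]
    simp only [List.getElem_map, List.getElem_range]
    rw [pv_set_map_range]
    have hcount : ((PySem.List.pyRange 0 (m : Int) 1).countP
        (fun j => decide (PySem.List.pyGetD row j 0 ≠ 0)) : Int)
        = pvCnt (row.take m) := by
      rw [pv_cnt_eq_countP, pv_take_eq_map_range row m hm]
      rw [PySem.List.pyRange_zero_nat, List.countP_map, List.countP_map]
      simp [Function.comp_def, PySem.List.pyGetD_natCast]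
    rw [hcount]
  · have hc := pv_cfold (fun j => PySem.List.pyGetD row j 0 ≠ 0) m m 0 (by omega) cg
    rw [Nat.cast_zero] at hc
    rw [hc]
    apply List.map_congr_left
    intro j hj
    simp only [Nat.zero_le, true_and, PySem.List.pyGetD_natCast, pvInd,
      List.getD_eq_getElem?_getD]
    by_cases h : row[j]?.getD 0 = 0 <;> simp [h]

lemma pv_colS_succ (L : List (List Int)) (t j : Nat) (ht : t < L.length) :
    pvColS L t j = pvInd (L.getD t []) j + pvColS L (t + 1) j := by
  unfold pvColS
  rw [show L.length - t = (L.length - (t + 1)) + 1 by omega, List.range'_succ]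
  simp

lemma pv_outer (L : List (List Int)) (m : Nat) (hm : ∀ r ∈ L, m ≤ r.length) :
    ∀ (k t : Nat), t + k = L.length → ∀ (rg cg : Nat → Int),
    (PySem.List.pyRange (t : Int) (L.length : Int) 1).foldl
      (fun (rc : List Int × List Int) i =>
        (PySem.List.pyRange 0 (m : Int) 1).foldl
          (fun rc j => if PySem.List.pyGetD (PySem.List.pyGetD L i []) j 0 ≠ 0 then
              (PySem.List.pySetD rc.1 i (PySem.List.pyGetD rc.1 i 0 + 1),
               PySem.List.pySetD rc.2 j (PySem.List.pyGetD rc.2 j 0 + 1)) else rc) rc)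
      ((List.range L.length).map rg, (List.range m).map cg)
    = ((List.range L.length).map
         (fun i => if t ≤ i then rg i + pvCnt ((L.getD i []).take m) else rg i),
       (List.range m).map (fun j => cg j + pvColS L t j)) := by
  intro k
  induction k with
  | zero =>
    intro t ht rg cg
    rw [PySem.List.pyRange_one_eq_nil (a := (t : Int)) (b := (L.length : Int))
      (by exact_mod_cast (by omega : L.length ≤ t))]
    rw [List.foldl_nil]
    rw [Prod.mk.injEq]
    constructor
    · apply List.map_congr_left
      intro i hi
      rw [List.mem_range] at hi
      rw [if_neg (by omega)]
    · apply List.map_congr_left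
      intro j hj
      have : pvColS L t j = 0 := by
        unfold pvColS
        rw [show L.length - t = 0 by omega]
        simp
      rw [this, add_zero]
  | succ k ih =>
    intro t ht rg cg
    rw [PySem.List.pyRange_one_cons (a := (t : Int)) (b := (L.length : Int))
      (by exact_mod_cast (by omega : t < L.length))]
    rw [List.foldl_cons]
    have hrow : m ≤ (PySem.List.pyGetD L (t : Int) []).length := by
      rw [PySem.List.pyGetD_natCast, List.getD_eq_getElem _ _ (by omega)]
      exact hm _ (List.getElem_mem _)
    rw [pv_inner (PySem.List.pyGetD L (t : Int) []) m hrow L.length t (by omega) rg cg]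
    rw [show ((t : Int) + 1) = ((t + 1 : Nat) : Int) by push_cast; ring]
    rw [ih (t + 1) (by omega)]
    rw [Prod.mk.injEq]
    constructor
    · apply List.map_congr_left
      intro i hi
      simp only [PySem.List.pyGetD_natCast]
      by_cases hit : i = t
      · subst hit
        simp [show ¬ (i + 1 ≤ i) by omega]
      · by_cases hti : t ≤ i
        · simp [hit, show t + 1 ≤ i by omega, hti]
        · simp [hit, show ¬ (t + 1 ≤ i) by omega, hti]
    · apply List.map_congr_left
      intro j hj
      simp only [PySem.List.pyGetD_natCast]
      rw [pv_colS_succ L t j (by omega)]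
      ring

-- ---- stability: a stable key sort is bucket concatenation in increasing key order ----

lemma pv_insertBy_append_left {α : Type} (before : α → α → Bool) (x : α) (l1 l2 : List α)
    (h : ∀ y ∈ l1, before x y = false) :
    PySem.List.insertBy before x (l1 ++ l2) = l1 ++ PySem.List.insertBy before x l2 := by
  induction l1 with
  | nil => simp
  | cons a l1 ih =>
    rw [List.cons_append, PySem.List.insertBy, if_neg (by simp [h a (by simp)])]
    rw [ih (fun y hy => h y (by simp [hy]))]
    rfl

lemma pv_insertBy_all_before {α : Type} (before : α → α → Bool) (x : α) (l : List α)
    (h : ∀ y ∈ l, before x y = true) :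
    PySem.List.insertBy before x l = x :: l := by
  cases l with
  | nil => rfl
  | cons a l => rw [PySem.List.insertBy, if_pos (h a (by simp))]

lemma pv_insert_bucket (key : Int → Int) (x : Int) :
    ∀ (vals : List Int), vals.Pairwise (· < ·) → key x ∈ vals → ∀ (xs : List Int),
    PySem.List.insertBy (fun a b => decide (key a < key b)) x
        (vals.flatMap (fun v => xs.filter (fun y => key y = v)))
      = vals.flatMap (fun v => (xs ++ [x]).filter (fun y => key y = v)) := by
  intro vals
  induction vals with
  | nil => intro _ hx; simp at hx
  | cons v vs ih =>
    intro hp hx xs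
    have hvs : ∀ w ∈ vs, v < w := (List.pairwise_cons.mp hp).1
    simp only [List.flatMap_cons]
    by_cases hxv : key x = v
    · rw [pv_insertBy_append_left _ _ _ _ (by
        intro y hy
        rw [List.mem_filter] at hy
        have hkey : key y = v := of_decide_eq_true hy.2
        simp [hxv, hkey])]
      rw [pv_insertBy_all_before _ _ _ (by
        intro y hy
        simp only [List.mem_flatMap, List.mem_filter] at hy
        obtain ⟨w, hw, _, hkey⟩ := hy
        have hkey' : key y = w := of_decide_eq_true hkey
        simp [hxv, hkey' ▸ hvs w hw])]
      have hxsx : (xs ++ [x]).filter (fun y => decide (key y = v))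
          = xs.filter (fun y => decide (key y = v)) ++ [x] := by
        rw [List.filter_append]
        congr 1
        simp [hxv]
      have h2 : vs.flatMap (fun w => (xs ++ [x]).filter (fun y => decide (key y = w)))
          = vs.flatMap (fun w => xs.filter (fun y => decide (key y = w))) := by
        apply List.flatMap_congr
        intro w hw
        rw [List.filter_append]
        have hne : key x ≠ w := hxv ▸ ne_of_lt (hvs w hw)
        simp [hne]
      rw [hxsx, h2, List.append_assoc]
      simp
    · have hxvs : key x ∈ vs := by
        rcases List.mem_cons.mp hx with h | h
        · exact absurd h hxv
        · exact h
      rw [pv_insertBy_append_left _ _ _ _ (by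
        intro y hy
        rw [List.mem_filter] at hy
        have hkey : key y = v := of_decide_eq_true hy.2
        simp [hkey, not_lt.mpr (le_of_lt (hvs _ hxvs))])]
      rw [ih (List.Pairwise.sublist (List.sublist_cons_self v vs) hp) hxvs xs]
      have hxv' : (xs ++ [x]).filter (fun y => decide (key y = v))
          = xs.filter (fun y => decide (key y = v)) := by
        rw [List.filter_append]
        simp [hxv]
      rw [hxv']

lemma pv_stable (key : Int → Int) (vals : List Int) (hv : vals.Pairwise (· < ·)) :
    ∀ xs : List Int, (∀ x ∈ xs, key x ∈ vals) →
    PySem.List.sorted xs key false = vals.flatMap (fun v => xs.filter (fun x => key x = v)) := by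
  intro xs
  induction xs using List.reverseRecOn with
  | nil => intro _; simp [PySem.List.sorted]
  | append_singleton xs x ih =>
    intro hcov
    rw [PySem.List.sorted_eq_foldl_insertBy, List.foldl_append, List.foldl_cons, List.foldl_nil,
      ← PySem.List.sorted_eq_foldl_insertBy]
    rw [ih (fun y hy => hcov y (by simp [hy]))]
    exact pv_insert_bucket key x vals hv (hcov x (by simp)) xs

-- ---- B-side characterizations ----

lemma pv_bucket_fold {β : Type} (key : Int × β → Int) (m : Nat) (ps : List (Int × β))
    (hk : ∀ p ∈ ps, ∃ k : Nat, k < m ∧ key p = (k : Int)) :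
    ∀ g : Nat → List Int,
    ps.foldl (fun bk p =>
        PySem.List.pySetD bk (key p) (PySem.List.pyGetD bk (key p) [] ++ [p.1]))
      ((List.range m).map g)
    = (List.range m).map
        (fun v => g v ++ (ps.filter (fun p => key p = (v : Int))).map (·.1)) := by
  induction ps with
  | nil => intro g; simp
  | cons p ps ih =>
    intro g
    obtain ⟨k, hk1, hk2⟩ := hk p (by simp)
    rw [List.foldl_cons, hk2, PySem.List.pyGetD_natCast, PySem.List.pySetD_natCast,
      PySem.List.getD_map_range _ _ _ _ hk1, pv_set_map_range,
      ih (fun q hq => hk q (by simp [hq]))]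
    apply List.map_congr_left
    intro v hv
    rw [List.mem_range] at hv
    rw [List.filter_cons]
    by_cases hvk : v = k
    · subst hvk
      rw [if_pos rfl, if_pos (by simp [hk2])]
      simp
    · rw [if_neg hvk, if_neg (by
        simp only [hk2, decide_eq_true_eq]
        exact fun h => hvk (by exact_mod_cast h.symm))]

lemma pv_zip_map_range (row : List Int) (m : Nat) (hm : m ≤ row.length) (g : Nat → Int) :
    ((List.range m).map g).zip row = (List.range m).map (fun j => (g j, row.getD j 0)) := by
  apply List.ext_getElem
  · simp; omega
  · intro k h1 h2
    simp only [List.length_zip, List.length_map, List.length_range] at h1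
    simp only [List.getElem_zip, List.getElem_map, List.getElem_range]
    rw [List.getD_eq_getElem _ _ (by omega)]

lemma pv_colfold (m : Nat) :
    ∀ (M : List (List Int)), (∀ r ∈ M, m ≤ r.length) → ∀ (g : Nat → Int),
    M.foldl (fun cn row => (cn.zip row).map (fun cv => cv.1 + (if cv.2 ≠ 0 then (1 : Int) else 0)))
      ((List.range m).map g)
    = (List.range m).map (fun j => g j + pvColS M 0 j) := by
  intro M
  induction M with
  | nil =>
    intro _ g
    simp only [List.foldl_nil]
    apply List.map_congr_left
    intro j _
    simp [pvColS]
  | cons r M ih =>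
    intro hlen g
    rw [List.foldl_cons, pv_zip_map_range r m (hlen r (by simp)) g, List.map_map]
    have : ((fun cv : Int × Int => cv.1 + (if cv.2 ≠ 0 then (1 : Int) else 0)) ∘
        (fun j => (g j, r.getD j 0))) = fun j => g j + pvInd r j := by
      funext j
      simp [Function.comp_def, pvInd]
    rw [this, ih (fun r' hr' => hlen r' (by simp [hr'])) (fun j => g j + pvInd r j)]
    apply List.map_congr_left
    intro j _
    have h0 : pvColS (r :: M) 0 j = pvInd r j + pvColS (r :: M) 1 j := by
      rw [pv_colS_succ (r :: M) 0 j (by simp)]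
      rfl
    have h1 : pvColS (r :: M) 1 j = pvColS M 0 j := by
      unfold pvColS
      simp only [List.length_cons, Nat.add_sub_cancel, Nat.sub_zero]
      rw [List.range'_eq_map_range, List.range'_eq_map_range, List.map_map, List.map_map]
      apply congrArg
      apply List.map_congr_left
      intro i _
      simp [Function.comp_def, Nat.add_comm 1 i]
    rw [h0, h1]
    ring

lemma pv_cnt_nonneg (xs : List Int) : 0 ≤ pvCnt xs := by
  rw [pv_cnt_eq_countP]; positivity

lemma pv_cnt_le_length (xs : List Int) : pvCnt xs ≤ (xs.length : Int) := by
  rw [pv_cnt_eq_countP]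
  exact_mod_cast List.countP_le_length

lemma pv_colS_eq_cnt (L : List (List Int)) (j : Nat) :
    pvColS L 0 j = pvCnt (L.map (fun row => row.getD j 0)) := by
  rw [pv_cnt_eq_countP]
  unfold pvColS
  rw [Nat.sub_zero, ← List.range_eq_range']
  rw [pv_map_eq_map_range L (fun row => row.getD j 0), List.countP_map]
  rw [show (fun i => pvInd (L.getD i []) j)
      = (fun i => if (fun i => decide ((L.getD i []).getD j 0 ≠ 0)) i = true then (1 : Int) else 0) from by
    funext i
    simp [pvInd]]
  rw [PySem.List.sum_map_ite_one_zero]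
  congr 1

lemma pv_rowcnt_eq (row : List Int) (m : Nat) (hm : m ≤ row.length) :
    (m : Int) - (PySem.List.count (PySem.List.slice row none (some (m : Int))) 0 : Nat)
      = pvCnt (row.take m) := by
  rw [PySem.List.slice_to_natCast, PySem.List.count_eq, pv_cnt_eq_countP]
  have hlen : (row.take m).length = m := by simp [hm]
  have hsum := List.length_eq_countP_add_countP (fun v => decide (v ≠ 0)) (l := row.take m)
  have hc : (row.take m).count 0
      = (row.take m).countP (fun a => decide (¬ decide (a ≠ 0) = true)) := by
    rw [List.count_eq_countP]
    apply List.countP_congr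
    intro a _
    simp only [beq_iff_eq, decide_eq_true_eq, ne_eq, Decidable.not_not]
  rw [hlen] at hsum
  omega

-- ---- per-index count lists shared by both characterizations ----

def pvRN (L : List (List Int)) : List Int :=
  (List.range L.length).map (fun i => pvCnt ((L.getD i []).take L.headI.length))

def pvCN (L : List (List Int)) : List Int :=
  (List.range L.headI.length).map (fun j => pvColS L 0 j)

lemma pv_getD_RN (L : List (List Int)) (j : Nat) (hj : j < L.length) :
    PySem.List.pyGetD (pvRN L) (j : Int) 0 = pvCnt ((L.getD j []).take L.headI.length) := by
  rw [PySem.List.pyGetD_natCast]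
  unfold pvRN
  rw [PySem.List.getD_map_range _ _ _ _ hj]

lemma pv_getD_CN (L : List (List Int)) (j : Nat) (hj : j < L.headI.length) :
    PySem.List.pyGetD (pvCN L) (j : Int) 0 = pvColS L 0 j := by
  rw [PySem.List.pyGetD_natCast]
  unfold pvCN
  rw [PySem.List.getD_map_range _ _ _ _ hj]

lemma pv_cnt_take_lt (row : List Int) (m : Nat) :
    pvCnt (row.take m) < (m : Int) + 1 := by
  have h1 := pv_cnt_le_length (row.take m)
  have h2 : ((row.take m).length : Int) ≤ (m : Int) := by
    simp [List.length_take]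
  omega

lemma pv_colS_bounds (L : List (List Int)) (j : Nat) :
    0 ≤ pvColS L 0 j ∧ pvColS L 0 j ≤ (L.length : Int) := by
  rw [pv_colS_eq_cnt]
  refine ⟨pv_cnt_nonneg _, le_trans (pv_cnt_le_length _) (by simp)⟩

lemma pv_cov_row (L : List (List Int)) :
    ∀ x ∈ PySem.List.pyRange 0 (L.length : Int) 1,
      PySem.List.pyGetD (pvRN L) x 0 ∈ PySem.List.pyRange 0 ((L.headI.length : Int) + 1) 1 := by
  intro x hx
  rw [PySem.List.mem_pyRange_one] at hx ⊢
  obtain ⟨j, rfl⟩ : ∃ j : Nat, x = (j : Int) := ⟨x.toNat, (Int.toNat_of_nonneg hx.1).symm⟩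
  rw [pv_getD_RN L j (by exact_mod_cast hx.2)]
  exact ⟨pv_cnt_nonneg _, pv_cnt_take_lt _ _⟩

lemma pv_cov_col (L : List (List Int)) :
    ∀ x ∈ PySem.List.pyRange 0 (L.headI.length : Int) 1,
      PySem.List.pyGetD (pvCN L) x 0 ∈ PySem.List.pyRange 0 ((L.length : Int) + 1) 1 := by
  intro x hx
  rw [PySem.List.mem_pyRange_one] at hx ⊢
  obtain ⟨j, rfl⟩ : ∃ j : Nat, x = (j : Int) := ⟨x.toNat, (Int.toNat_of_nonneg hx.1).symm⟩
  rw [pv_getD_CN L j (by exact_mod_cast hx.2)]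
  have := pv_colS_bounds L j
  exact ⟨this.1, by omega⟩

-- ---- characterization of A: the two stable key sorts ----

lemma pv_A_char (r0 : List Int) (rest : List (List Int))
    (hpre : ∀ r ∈ r0 :: rest, r0.length ≤ r.length) :
    choose_orders (r0 :: rest)
      = (PySem.List.sorted (PySem.List.pyRange 0 (((r0 :: rest).length : Nat) : Int) 1)
           (fun x => PySem.List.pyGetD (pvRN (r0 :: rest)) x 0) false,
         PySem.List.sorted (PySem.List.pyRange 0 ((r0.length : Nat) : Int) 1)
           (fun x => PySem.List.pyGetD (pvCN (r0 :: rest)) x 0) false) := by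
  have hA := pv_outer (r0 :: rest) r0.length hpre (r0 :: rest).length 0 (by omega)
    (fun _ => (0 : Int)) (fun _ => (0 : Int))
  rw [Nat.cast_zero] at hA
  simp only [choose_orders]
  rw [if_neg (show ¬(((r0 :: rest).length : Int) = 0) by rw [Nat.cast_eq_zero]; simp)]
  simp only [PySem.List.pyGetD_zero_cons]
  have hinit1 : (PySem.List.pyRange 0 ((r0 :: rest).length : Int) 1).map (fun _ => (0 : Int))
      = (List.range (r0 :: rest).length).map (fun _ => (0 : Int)) := by
    rw [PySem.List.pyRange_zero_nat, List.map_map]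
    rfl
  have hinit2 : (PySem.List.pyRange 0 (r0.length : Int) 1).map (fun _ => (0 : Int))
      = (List.range r0.length).map (fun _ => (0 : Int)) := by
    rw [PySem.List.pyRange_zero_nat, List.map_map]
    rfl
  rw [hinit1, hinit2, hA]
  have hr : (List.range (r0 :: rest).length).map
        (fun i => if 0 ≤ i then 0 + pvCnt (((r0 :: rest).getD i []).take r0.length) else 0)
      = pvRN (r0 :: rest) := by
    unfold pvRN
    simp
  have hc : (List.range r0.length).map (fun j => 0 + pvColS (r0 :: rest) 0 j)
      = pvCN (r0 :: rest) := by
    unfold pvCN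
    simp
  rw [hr, hc]

-- ---- characterization of B: bucket concatenation ----

lemma pv_flatten_eq_flatMap (f : Nat → List Int) (g : Int → List Int) :
    ∀ l : List Nat, (∀ v ∈ l, f v = g (v : Int)) →
    (l.map f).flatten = (l.map (fun k : Nat => (k : Int))).flatMap g := by
  intro l
  induction l with
  | nil => intro _; simp
  | cons a l ih =>
    intro h
    simp only [List.map_cons, List.flatten_cons, List.flatMap_cons]
    rw [h a (by simp), ih (fun v hv => h v (by simp [hv]))]

lemma pv_row_bucket_eq (r0 : List Int) (rest : List (List Int))
    (hpre : ∀ r ∈ r0 :: rest, r0.length ≤ r.length) (v : Int) :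
    ((PySem.List.enumerate (r0 :: rest) 0).filter
        (fun p => ((r0.length : Int)
          - (PySem.List.count (PySem.List.slice p.2 none (some (r0.length : Int))) 0 : Nat)) = v)).map (·.1)
      = (PySem.List.pyRange 0 (((r0 :: rest).length : Nat) : Int) 1).filter
          (fun x => PySem.List.pyGetD (pvRN (r0 :: rest)) x 0 = v) := by
  rw [PySem.List.enumerate_eq_map_pyRange (r0 :: rest) ([] : List Int),
    List.filter_map, List.map_map]
  have hid : ((fun p : Int × List Int => p.1) ∘
      (fun j => (j, PySem.List.pyGetD (r0 :: rest) j []))) = id := by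
    funext j
    rfl
  rw [hid, List.map_id]
  apply List.filter_congr
  intro x hx
  rw [PySem.List.mem_pyRange_one] at hx
  obtain ⟨j, rfl⟩ : ∃ j : Nat, x = (j : Int) := ⟨x.toNat, (Int.toNat_of_nonneg hx.1).symm⟩
  have hj : j < (r0 :: rest).length := by
    have := hx.2
    simp only [PySem.List.len] at this
    exact_mod_cast this
  have hrow : r0.length ≤ ((r0 :: rest).getD j []).length := by
    rw [List.getD_eq_getElem _ _ hj]
    exact hpre _ (List.getElem_mem _)
  have hkey : ((r0.length : Int) - (PySem.List.count
        (PySem.List.slice (PySem.List.pyGetD (r0 :: rest) (j : Int) []) none (some (r0.length : Int))) 0 : Nat))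
      = PySem.List.pyGetD (pvRN (r0 :: rest)) (j : Int) 0 := by
    rw [pv_getD_RN _ _ hj, List.headI_cons]
    simp only [PySem.List.pyGetD_natCast]
    exact pv_rowcnt_eq _ _ hrow
  simp only [Function.comp_def, hkey]

lemma pv_col_bucket_eq (L : List (List Int)) (v : Int) :
    ((PySem.List.enumerate (pvCN L) 0).filter (fun p => p.2 = v)).map (·.1)
      = (PySem.List.pyRange 0 ((L.headI.length : Nat) : Int) 1).filter
          (fun x => PySem.List.pyGetD (pvCN L) x 0 = v) := by
  rw [PySem.List.enumerate_eq_map_pyRange (pvCN L) (0 : Int), List.filter_map, List.map_map]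
  have hid : ((fun p : Int × Int => p.1) ∘
      (fun j => (j, PySem.List.pyGetD (pvCN L) j 0))) = id := by
    funext j
    rfl
  rw [hid, List.map_id]
  have hlen : PySem.List.len (pvCN L) = ((L.headI.length : Nat) : Int) := by
    unfold pvCN
    simp [PySem.List.len]
  rw [hlen]
  rfl

lemma pv_B_char (r0 : List Int) (rest : List (List Int))
    (hpre : ∀ r ∈ r0 :: rest, r0.length ≤ r.length) :
    choose_orders_alt (r0 :: rest)
      = ((PySem.List.pyRange 0 ((r0.length : Int) + 1) 1).flatMap
           (fun v => (PySem.List.pyRange 0 (((r0 :: rest).length : Nat) : Int) 1).filter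
             (fun x => PySem.List.pyGetD (pvRN (r0 :: rest)) x 0 = v)),
         (PySem.List.pyRange 0 (((r0 :: rest).length : Int) + 1) 1).flatMap
           (fun v => (PySem.List.pyRange 0 ((r0.length : Nat) : Int) 1).filter
             (fun x => PySem.List.pyGetD (pvCN (r0 :: rest)) x 0 = v))) := by
  simp only [choose_orders_alt]
  -- split the fused fold into its two independent components
  have hsplit := PySem.List.foldl_prod_mk
    (fun bk (p : Int × List Int) => PySem.List.pySetD bk
        ((r0.length : Int) - (PySem.List.count (PySem.List.slice p.2 none (some (r0.length : Int))) 0 : Nat))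
        (PySem.List.pyGetD bk
          ((r0.length : Int) - (PySem.List.count (PySem.List.slice p.2 none (some (r0.length : Int))) 0 : Nat)) []
          ++ [p.1]))
    (fun cn (p : Int × List Int) =>
        (cn.zip p.2).map (fun cv => cv.1 + (if cv.2 ≠ 0 then (1 : Int) else 0)))
    (PySem.List.enumerate (r0 :: rest) 0)
    ((PySem.List.pyRange 0 ((r0.length : Int) + 1) 1).map (fun _ => ([] : List Int)))
    (List.replicate r0.length (0 : Int))
  rw [hsplit]
  -- initial bucket lists as maps over List.range
  have hinitR : (PySem.List.pyRange 0 ((r0.length : Int) + 1) 1).map (fun _ => ([] : List Int))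
      = (List.range (r0.length + 1)).map (fun _ => ([] : List Int)) := by
    rw [show ((r0.length : Int) + 1) = (((r0.length + 1 : Nat)) : Int) by push_cast; ring,
      PySem.List.pyRange_zero_nat, List.map_map]
    rfl
  have hinitC : (PySem.List.pyRange 0 (((r0 :: rest).length : Int) + 1) 1).map (fun _ => ([] : List Int))
      = (List.range ((r0 :: rest).length + 1)).map (fun _ => ([] : List Int)) := by
    rw [show (((r0 :: rest).length : Int) + 1) = ((((r0 :: rest).length + 1 : Nat)) : Int) by push_cast; ring,
      PySem.List.pyRange_zero_nat, List.map_map]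
    rfl
  -- the column-count component: fold over the rows only
  have hsnd : (PySem.List.enumerate (r0 :: rest) 0).foldl
      (fun cn (p : Int × List Int) =>
        (cn.zip p.2).map (fun cv => cv.1 + (if cv.2 ≠ 0 then (1 : Int) else 0)))
      (List.replicate r0.length (0 : Int))
      = pvCN (r0 :: rest) := by
    have h1 : (PySem.List.enumerate (r0 :: rest) 0).foldl
        (fun cn (p : Int × List Int) =>
          (cn.zip p.2).map (fun cv => cv.1 + (if cv.2 ≠ 0 then (1 : Int) else 0)))
        (List.replicate r0.length (0 : Int))
        = ((PySem.List.enumerate (r0 :: rest) 0).map (·.2)).foldl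
            (fun cn row =>
              (cn.zip row).map (fun cv => cv.1 + (if cv.2 ≠ 0 then (1 : Int) else 0)))
            (List.replicate r0.length (0 : Int)) := by
      rw [List.foldl_map]
    rw [h1, PySem.List.map_snd_enumerate]
    have hrep : List.replicate r0.length (0 : Int)
        = (List.range r0.length).map (fun _ => (0 : Int)) := by
      rw [List.map_const', List.length_range]
    rw [hrep, pv_colfold r0.length (r0 :: rest) hpre (fun _ => (0 : Int))]
    unfold pvCN
    simp
  rw [hinitR, hsnd]
  -- the row buckets
  rw [pv_bucket_fold
    (fun p : Int × List Int => (r0.length : Int)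
      - (PySem.List.count (PySem.List.slice p.2 none (some (r0.length : Int))) 0 : Nat))
    (r0.length + 1) (PySem.List.enumerate (r0 :: rest) 0)
    (by
      intro p hp
      rw [PySem.List.mem_enumerate_iff] at hp
      obtain ⟨k, hk, rfl⟩ := hp
      have hrow : r0.length ≤ (r0 :: rest)[k].length := hpre _ (List.getElem_mem _)
      have heq : ((r0.length : Int)
          - (PySem.List.count (PySem.List.slice (r0 :: rest)[k] none (some (r0.length : Int))) 0 : Nat))
          = pvCnt ((r0 :: rest)[k].take r0.length) := pv_rowcnt_eq _ _ hrow
      refine ⟨((r0 :: rest)[k].take r0.length).countP (fun v => decide (v ≠ 0)), ?_, ?_⟩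
      · have h1 : ((r0 :: rest)[k].take r0.length).countP (fun v => decide (v ≠ 0))
            ≤ ((r0 :: rest)[k].take r0.length).length := List.countP_le_length
        have h2 : ((r0 :: rest)[k].take r0.length).length ≤ r0.length := by
          simp [List.length_take]
        omega
      · show ((r0.length : Int)
            - (PySem.List.count (PySem.List.slice (r0 :: rest)[k] none (some (r0.length : Int))) 0 : Nat)) = _
        rw [heq]
        exact pv_cnt_eq_countP _)]
  -- the column buckets
  rw [hinitC, pv_bucket_fold (fun p : Int × Int => p.2) ((r0 :: rest).length + 1)
    (PySem.List.enumerate (pvCN (r0 :: rest)) 0)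
    (by
      intro p hp
      rw [PySem.List.mem_enumerate_iff] at hp
      obtain ⟨k, hk, rfl⟩ := hp
      have hklen : k < (r0 :: rest).headI.length := by
        unfold pvCN at hk
        simpa using hk
      have hval : (pvCN (r0 :: rest))[k] = pvColS (r0 :: rest) 0 k := by
        unfold pvCN
        simp
      have hcnt : pvColS (r0 :: rest) 0 k
          = pvCnt ((r0 :: rest).map (fun row => row.getD k 0)) := pv_colS_eq_cnt _ _
      refine ⟨((r0 :: rest).map (fun row => row.getD k 0)).countP (fun v => decide (v ≠ 0)), ?_, ?_⟩
      · have h1 : ((r0 :: rest).map (fun row => row.getD k 0)).countP (fun v => decide (v ≠ 0))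
            ≤ ((r0 :: rest).map (fun row => row.getD k 0)).length := List.countP_le_length
        have h2 : ((r0 :: rest).map (fun row => row.getD k 0)).length = (r0 :: rest).length := by
          simp
        omega
      · simp only [hval, hcnt]
        exact pv_cnt_eq_countP _)]
  -- concatenate buckets = flatMap over the key range
  rw [Prod.mk.injEq]
  constructor
  · rw [show PySem.List.pyRange 0 ((r0.length : Int) + 1) 1
        = (List.range (r0.length + 1)).map (fun k : Nat => (k : Int)) from by
      rw [show ((r0.length : Int) + 1) = (((r0.length + 1 : Nat)) : Int) by push_cast; ring,
        PySem.List.pyRange_zero_nat]]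
    refine pv_flatten_eq_flatMap _ _ _ (fun v _ => ?_)
    exact pv_row_bucket_eq r0 rest hpre (v : Int)
  · rw [show PySem.List.pyRange 0 (((r0 :: rest).length : Int) + 1) 1
        = (List.range ((r0 :: rest).length + 1)).map (fun k : Nat => (k : Int)) from by
      rw [show (((r0 :: rest).length : Int) + 1) = ((((r0 :: rest).length + 1 : Nat)) : Int) by push_cast; ring,
        PySem.List.pyRange_zero_nat]]
    refine pv_flatten_eq_flatMap _ _ _ (fun v _ => ?_)
    exact pv_col_bucket_eq (r0 :: rest) (v : Int)

-- ===== VERDICT (by name: the statement is the Claim_ definition above) =====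
theorem choose_orders_spec : Claim_equal_choose_orders := by
  intro L _ hpre
  unfold Spec_choose_orders
  cases L with
  | nil => decide
  | cons r0 rest =>
    have hpre' : ∀ r ∈ r0 :: rest, r0.length ≤ r.length := by
      unfold Pre_choose_orders at hpre
      simpa using hpre
    rw [pv_A_char r0 rest hpre', pv_B_char r0 rest hpre']
    rw [pv_stable (fun x => PySem.List.pyGetD (pvRN (r0 :: rest)) x 0)
      (PySem.List.pyRange 0 ((r0.length : Int) + 1) 1)
      (PySem.List.pairwise_lt_pyRange_one _ _) _
      (by simpa using pv_cov_row (r0 :: rest))]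
    rw [pv_stable (fun x => PySem.List.pyGetD (pvCN (r0 :: rest)) x 0)
      (PySem.List.pyRange 0 (((r0 :: rest).length : Int) + 1) 1)
      (PySem.List.pairwise_lt_pyRange_one _ _) _
      (by simpa using pv_cov_col (r0 :: rest))]
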